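-- pv_equiv track=rewrite | github.com/qq1846775497/JHLocalSkill | 02_ProjectLungfish专用/02_数据配置与策划/03_策划工具/ConfigurationTools/ConfigFacilityOrAccessory/add_building_entry.py | _building_block_type_from_tags
-- ===== SOURCE A (Python) =====
-- ACCESSORY_SIZE_TAGS = {"Big", "Medium", "Small"}
--
-- def _building_block_type_from_tags(tags: list[str]) -> str | None:
--     """Derive BuildingBlock Type from a list of EntityType tag strings."""
--     for tag in tags:
--         if tag.startswith("EntityType.Building.Facility"):
--             return "BuildingBlock.Facility"
--     for tag in tags:
--         if tag.startswith("EntityType.Building.Accessory."):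
--             sub = tag[len("EntityType.Building.Accessory."):]
--             if sub not in ACCESSORY_SIZE_TAGS:
--                 return tag.replace("EntityType.Building", "BuildingBlock", 1)
--     return None
-- ===== SOURCE B (Python) =====
-- def _building_block_type_from_tags(tags: list[str]) -> str | None:
--     """Derive BuildingBlock Type from a list of EntityType tag strings.
--
--     Single pass: return Facility immediately; remember the first qualifying
--     accessory and build its name by concatenation instead of str.replace."""
--     candidate = None
--     for tag in tags:
--         if tag.startswith("EntityType.Building.Facility"):
--             return "BuildingBlock.Facility"
--         if candidate is None and tag.startswith("EntityType.Building.Accessory."):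
--             sub = tag[len("EntityType.Building.Accessory."):]
--             if sub not in ("Big", "Medium", "Small"):
--                 candidate = "BuildingBlock.Accessory." + sub
--     return candidate
-- ===== Notes on version B (the rewrite author's own statement) =====
-- stated objective: alternative
-- what changed: Two sequential scans (Facility pass, then accessory pass with a count-1 str.replace) become one loop that returns Facility immediately and records the first qualifying accessory as a candidate built by plain string concatenation.
import Mathlib
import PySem

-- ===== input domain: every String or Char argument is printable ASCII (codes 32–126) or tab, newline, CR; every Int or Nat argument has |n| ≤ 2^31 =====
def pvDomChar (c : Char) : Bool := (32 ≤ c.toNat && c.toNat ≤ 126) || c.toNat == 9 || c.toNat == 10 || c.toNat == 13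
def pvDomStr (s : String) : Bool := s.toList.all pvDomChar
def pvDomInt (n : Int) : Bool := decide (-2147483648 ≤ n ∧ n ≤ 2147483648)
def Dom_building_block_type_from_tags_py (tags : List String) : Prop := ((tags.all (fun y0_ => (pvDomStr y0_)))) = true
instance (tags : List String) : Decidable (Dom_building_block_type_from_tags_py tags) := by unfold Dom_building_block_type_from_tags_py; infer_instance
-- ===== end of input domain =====

-- B replaces A's two sequential scans by one single-pass loop with a first-accessory candidate (alternative decomposition, same cost).

-- ===== PORT A =====
def ACCESSORY_SIZE_TAGS : PySem.Set String := PySem.Set.ofList ["Big", "Medium", "Small"]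

-- exact hand port of s.replace(old, new, 1) for old ≠ "" (PySem has no count-limited replace):
-- find the first occurrence and splice `new` over it, as CPython does for count=1.
def pyReplaceOnce (s old new : String) : String :=
  let i := PySem.Str.find s old
  if i = -1 then s
  else String.ofList (s.toList.take i.toNat ++ new.toList ++ s.toList.drop (i.toNat + old.toList.length))

-- first loop of A
def pvA_facLoop : List String → Option String
  | [] => none
  | t :: ts =>
    if PySem.Str.startswith t "EntityType.Building.Facility" then some "BuildingBlock.Facility"
    else pvA_facLoop ts

-- second loop of A
def pvA_accLoop : List String → Option String
  | [] => none
  | t :: ts =>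
    if PySem.Str.startswith t "EntityType.Building.Accessory." then
      let sub := PySem.Str.slice t (some ((30 : Nat) : Int)) none  -- tag[len("EntityType.Building.Accessory."):]
      if !(ACCESSORY_SIZE_TAGS.contains sub) then
        some (pyReplaceOnce t "EntityType.Building" "BuildingBlock")
      else pvA_accLoop ts
    else pvA_accLoop ts

def building_block_type_from_tags_py (tags : List String) : Option String :=
  match pvA_facLoop tags with
  | some r => some r
  | none => pvA_accLoop tags

-- ===== PORT B =====
def pvB_loop : List String → Option String → Option String
  | [], cand => cand
  | t :: ts, cand =>
    if PySem.Str.startswith t "EntityType.Building.Facility" then some "BuildingBlock.Facility"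
    else if cand.isNone && PySem.Str.startswith t "EntityType.Building.Accessory." then
      let sub := PySem.Str.slice t (some ((30 : Nat) : Int)) none
      if !(sub == "Big" || sub == "Medium" || sub == "Small") then
        -- candidate = "BuildingBlock.Accessory." + sub
        pvB_loop ts (some (String.ofList ("BuildingBlock.Accessory.".toList ++ sub.toList)))
      else pvB_loop ts cand
    else pvB_loop ts cand

def building_block_type_from_tags_py_alt (tags : List String) : Option String :=
  pvB_loop tags none

-- ===== PRECONDITION & SPEC =====
def Spec_building_block_type_from_tags_py (tags : List String) (out : Option String) : Prop := out = building_block_type_from_tags_py_alt tags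
instance (tags : List String) (out : Option String) : Decidable (Spec_building_block_type_from_tags_py tags out) := by unfold Spec_building_block_type_from_tags_py; infer_instance

-- ===== CLAIM (what is proved, stated in full; the proofs are below) =====
def Claim_equal_building_block_type_from_tags_py : Prop := ∀ (tags : List String), Dom_building_block_type_from_tags_py tags → Spec_building_block_type_from_tags_py tags (building_block_type_from_tags_py tags)

-- ===== LEMMAS AND PROOFS =====

-- A's set-membership test equals B's three equality tests.
lemma set_contains_eq (sub : String) :
    ACCESSORY_SIZE_TAGS.contains sub = (sub == "Big" || sub == "Medium" || sub == "Small") := by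
  have h : ACCESSORY_SIZE_TAGS = ["Big", "Medium", "Small"] := by decide
  rw [h]
  show List.elem sub _ = _
  simp only [List.elem]
  cases h1 : sub == "Big" <;> cases h2 : sub == "Medium" <;> cases h3 : sub == "Small" <;>
    simp

-- On a tag with the accessory prefix, A's count-1 replace equals B's concatenation with the suffix.
lemma replace_once_eq (t : String)
    (h : PySem.Str.startswith t "EntityType.Building.Accessory." = true) :
    pyReplaceOnce t "EntityType.Building" "BuildingBlock"
      = String.ofList ("BuildingBlock.Accessory.".toList
          ++ (PySem.Str.slice t (some ((30 : Nat) : Int)) none).toList) := by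
  rw [PySem.Str.startswith_eq, PySem.Chars.startswith_iff] at h
  obtain ⟨rest, hrest⟩ := h
  have hold : "EntityType.Building".toList <+: t.toList := by
    rw [← hrest]
    exact ((by decide : "EntityType.Building".toList <+: "EntityType.Building.Accessory.".toList).trans
      (List.prefix_append _ _))
  have hfind : PySem.Str.find t "EntityType.Building" = 0 := by
    have hnn : 0 ≤ PySem.Str.find t "EntityType.Building" := by
      rw [PySem.Str.find_nonneg_iff]; exact hold.isInfix
    rw [PySem.Str.find_eq] at hnn ⊢
    have hspec := PySem.Chars.find_spec (s := t.toList) (sub := "EntityType.Building".toList) hnn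
    by_contra hne
    have hpos : 0 < (PySem.Chars.find t.toList "EntityType.Building".toList).toNat := by omega
    exact (hspec.2 0 hpos) (by simpa using hold)
  unfold pyReplaceOnce
  rw [hfind]
  simp only [show ¬((0:Int) = -1) by decide, Int.toNat_zero, List.take_zero, List.nil_append]
  have hslice : (PySem.Str.slice t (some ((30 : Nat) : Int)) none).toList = t.toList.drop 30 := by
    rw [PySem.Str.toList_slice, PySem.Chars.slice_eq_listSlice, PySem.List.slice_from_natCast]
  rw [hslice, ← hrest]
  have h19 : "EntityType.Building".toList.length = 19 := by decide
  rw [h19]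
  simp only [if_false, Nat.zero_add]
  have hd : List.drop 19 ("EntityType.Building.Accessory.".toList ++ rest)
      = ".Accessory.".toList ++ rest := by
    rw [List.drop_append_of_le_length (by decide),
        show List.drop 19 "EntityType.Building.Accessory.".toList = ".Accessory.".toList from by decide]
  have hd30 : List.drop 30 ("EntityType.Building.Accessory.".toList ++ rest) = rest := by
    rw [List.drop_append_of_le_length (by decide),
        show List.drop 30 "EntityType.Building.Accessory.".toList = [] from by decide,
        List.nil_append]
  rw [hd, hd30]
  congr 1

-- Invariant of B's single pass: a later Facility tag still wins; otherwise the stored candidate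
-- (or, with none stored, A's accessory scan) is the result.
lemma loop_invariant (ts : List String) (cand : Option String) :
    pvB_loop ts cand =
      match pvA_facLoop ts with
      | some r => some r
      | none => match cand with
        | some c => some c
        | none => pvA_accLoop ts := by
  induction ts generalizing cand with
  | nil => cases cand <;> rfl
  | cons t ts ih =>
    cases hf : PySem.Str.startswith t "EntityType.Building.Facility" with
    | true => simp only [pvB_loop, pvA_facLoop, hf, if_true]
    | false =>
      cases cand with
      | some c =>
        rw [show pvB_loop (t :: ts) (some c) = pvB_loop ts (some c) from by
          simp only [pvB_loop, hf, Option.isNone_some, Bool.false_and, Bool.false_eq_true,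
            if_false]]
        rw [ih]
        simp only [pvA_facLoop, hf, Bool.false_eq_true, if_false]
      | none =>
        cases ha : PySem.Str.startswith t "EntityType.Building.Accessory." with
        | false =>
          rw [show pvB_loop (t :: ts) none = pvB_loop ts none from by
            simp only [pvB_loop, hf, ha, Option.isNone_none, Bool.true_and, Bool.false_eq_true,
              if_false]]
          rw [ih]
          simp only [pvA_facLoop, pvA_accLoop, hf, ha, Bool.false_eq_true, if_false]
        | true =>
          cases hsz : ((PySem.Str.slice t (some ((30 : Nat) : Int)) none) == "Big"
              || (PySem.Str.slice t (some ((30 : Nat) : Int)) none) == "Medium"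
              || (PySem.Str.slice t (some ((30 : Nat) : Int)) none) == "Small") with
          | true =>
            rw [show pvB_loop (t :: ts) none = pvB_loop ts none from by
              simp only [pvB_loop, hf, ha, Option.isNone_none, Bool.true_and, hsz,
                Bool.not_true, Bool.false_eq_true, if_false, if_true]]
            rw [ih]
            simp only [pvA_facLoop, pvA_accLoop, hf, ha, set_contains_eq, hsz,
              Bool.not_true, Bool.false_eq_true, if_false, if_true]
          | false =>
            rw [show pvB_loop (t :: ts) none
                = pvB_loop ts (some (String.ofList ("BuildingBlock.Accessory.".toList
                    ++ (PySem.Str.slice t (some ((30 : Nat) : Int)) none).toList))) from by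
              simp only [pvB_loop, hf, ha, Option.isNone_none, Bool.true_and, hsz,
                Bool.not_false, Bool.false_eq_true, if_false, if_true]]
            rw [ih]
            simp only [pvA_facLoop, pvA_accLoop, hf, ha, set_contains_eq, hsz,
              Bool.not_false, Bool.false_eq_true, if_false, if_true, replace_once_eq t ha]

-- ===== VERDICT (by name: the statement is the Claim_ definition above) =====
theorem building_block_type_from_tags_py_spec : Claim_equal_building_block_type_from_tags_py := by
  intro tags _
  unfold Spec_building_block_type_from_tags_py building_block_type_from_tags_py building_block_type_from_tags_py_alt
  rw [loop_invariant]
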